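-- pv_equiv track=rewrite | github.com/ozanbayiz/A2DM | utils/training.py | _colorize_message
-- ===== SOURCE A (Python) =====
-- class COLORS:
--     """ANSI color codes for terminal output."""
--     RESET = "\033[0m"
--     BOLD = "\033[1m"
--     UNDERLINE = "\033[4m"
--
--     # Foreground colors
--     BLACK = "\033[30m"
--     RED = "\033[31m"
--     GREEN = "\033[32m"
--     YELLOW = "\033[33m"
--     BLUE = "\033[34m"
--     MAGENTA = "\033[35m"
--     CYAN = "\033[36m"
--     WHITE = "\033[37m"
--
--     # Background colors
--     BG_BLACK = "\033[40m"
--     BG_RED = "\033[41m"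
--     BG_GREEN = "\033[42m"
--     BG_YELLOW = "\033[43m"
--     BG_BLUE = "\033[44m"
--     BG_MAGENTA = "\033[45m"
--     BG_CYAN = "\033[46m"
--     BG_WHITE = "\033[47m"
--
-- def _colorize_message(msg):
--     """Add colors to specific keywords in the message."""
--     color_mappings = {
--         "Epoch": COLORS.YELLOW,
--         "Loss:": f"{COLORS.BOLD}{COLORS.MAGENTA}",
--         "(Recon:": f"({COLORS.CYAN}",
--         "KL:": COLORS.GREEN,
--         "LR:": f"{COLORS.BOLD}{COLORS.BLUE}",
--         "Model:": f"{COLORS.BOLD}{COLORS.WHITE}"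
--     }
--
--     for keyword, color in color_mappings.items():
--         if keyword in msg:
--             msg = msg.replace(keyword, f"{color}{keyword}{COLORS.RESET}")
--     return msg
-- ===== SOURCE B (Python) =====
-- import re
--
-- class COLORS:
--     """ANSI color codes for terminal output."""
--     RESET = "\033[0m"
--     BOLD = "\033[1m"
--     UNDERLINE = "\033[4m"
--     BLACK = "\033[30m"
--     RED = "\033[31m"
--     GREEN = "\033[32m"
--     YELLOW = "\033[33m"
--     BLUE = "\033[34m"
--     MAGENTA = "\033[35m"
--     CYAN = "\033[36m"
--     WHITE = "\033[37m"
--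
-- # keyword -> fully colorized replacement, precomputed once
-- _COLORIZED = {
--     "Epoch": f"{COLORS.YELLOW}Epoch{COLORS.RESET}",
--     "Loss:": f"{COLORS.BOLD}{COLORS.MAGENTA}Loss:{COLORS.RESET}",
--     "(Recon:": f"({COLORS.CYAN}(Recon:{COLORS.RESET}",
--     "KL:": f"{COLORS.GREEN}KL:{COLORS.RESET}",
--     "LR:": f"{COLORS.BOLD}{COLORS.BLUE}LR:{COLORS.RESET}",
--     "Model:": f"{COLORS.BOLD}{COLORS.WHITE}Model:{COLORS.RESET}",
-- }
-- _PATTERN = re.compile("|".join(re.escape(k) for k in _COLORIZED))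
--
-- def _colorize_message(msg):
--     """Add colors to specific keywords in the message (single regex pass)."""
--     return _PATTERN.sub(lambda m: _COLORIZED[m.group(0)], msg)
-- ===== Notes on version B (the rewrite author's own statement) =====
-- stated objective: idiomatic
-- what changed: A rescans and rebuilds the whole string once per keyword (six sequential str.replace passes over the growing result); B precompiles one literal-alternation regex and colorizes every keyword occurrence in a single left-to-right re.sub pass over the original string.
import Mathlib
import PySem

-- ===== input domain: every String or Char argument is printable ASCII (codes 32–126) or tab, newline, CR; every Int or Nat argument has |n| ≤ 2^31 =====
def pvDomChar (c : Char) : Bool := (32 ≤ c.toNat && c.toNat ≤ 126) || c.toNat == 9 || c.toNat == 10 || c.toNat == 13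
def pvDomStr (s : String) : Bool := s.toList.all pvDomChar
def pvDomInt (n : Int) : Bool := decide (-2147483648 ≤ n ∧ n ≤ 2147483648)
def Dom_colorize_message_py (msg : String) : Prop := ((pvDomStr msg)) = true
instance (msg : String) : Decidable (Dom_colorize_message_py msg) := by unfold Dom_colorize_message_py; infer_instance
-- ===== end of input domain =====

-- B replaces A's six sequential whole-string replace passes by ONE left-to-right scan (a
-- precompiled literal-alternation regex sub): an alternative single-pass algorithm, same value.

-- ===== PORT A =====
def COLORS_RESET : String := "\x1b[0m"
def COLORS_BOLD : String := "\x1b[1m"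
def COLORS_GREEN : String := "\x1b[32m"
def COLORS_YELLOW : String := "\x1b[33m"
def COLORS_BLUE : String := "\x1b[34m"
def COLORS_MAGENTA : String := "\x1b[35m"
def COLORS_CYAN : String := "\x1b[36m"
def COLORS_WHITE : String := "\x1b[37m"

-- the dict literal of A (insertion order kept)
def colorMappings : PySem.Dict String String :=
  PySem.Dict.ofList
  [("Epoch", COLORS_YELLOW),
   ("Loss:", COLORS_BOLD ++ COLORS_MAGENTA),
   ("(Recon:", "(" ++ COLORS_CYAN),
   ("KL:", COLORS_GREEN),
   ("LR:", COLORS_BOLD ++ COLORS_BLUE),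
   ("Model:", COLORS_BOLD ++ COLORS_WHITE)]

def colorize_message_py (msg : String) : String :=
  colorMappings.items.foldl
    (fun m kv =>
      if PySem.Str.isIn kv.1 m then PySem.Str.replace m kv.1 (kv.2 ++ kv.1 ++ COLORS_RESET) else m)
    msg

-- ===== PORT B =====
-- Source B precomputes a keyword → colorized-replacement table and joins the (re.escape'd, hence
-- literal) keywords into one alternation pattern, in dict order, then does a single
-- _PATTERN.sub.  For a literal-alternation pattern, re.sub is exactly a left-to-right scan
-- that at each position tries the alternatives in pattern order, replaces the first match and
-- resumes after it; that scan (over Source B's precomputed table) is what is transcribed here.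
def altTable : List (List Char × List Char) :=
  [("Epoch".toList, "\x1b[33mEpoch\x1b[0m".toList),
   ("Loss:".toList, "\x1b[1m\x1b[35mLoss:\x1b[0m".toList),
   ("(Recon:".toList, "(\x1b[36m(Recon:\x1b[0m".toList),
   ("KL:".toList, "\x1b[32mKL:\x1b[0m".toList),
   ("LR:".toList, "\x1b[1m\x1b[34mLR:\x1b[0m".toList),
   ("Model:".toList, "\x1b[1m\x1b[37mModel:\x1b[0m".toList)]

def subAlt (table : List (List Char × List Char)) : List Char → List Char
  | [] => []
  | c :: t =>
    match List.find? (fun kr => kr.1.isPrefixOf (c :: t)) table with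
    | some kr => kr.2 ++ subAlt table (List.drop (kr.1.length - 1) t)
    | none => c :: subAlt table t
termination_by cs => cs.length
decreasing_by
  all_goals (simp [List.length_drop]; try omega)

def colorize_message_py_alt (msg : String) : String :=
  String.ofList (subAlt altTable msg.toList)

-- ===== PRECONDITION & SPEC =====
def Spec_colorize_message_py (msg : String) (out : String) : Prop := out = colorize_message_py_alt msg
instance (msg : String) (out : String) : Decidable (Spec_colorize_message_py msg out) := by unfold Spec_colorize_message_py; infer_instance

-- ===== CLAIM (what is proved, stated in full; the proofs are below) =====
def Claim_equal_colorize_message_py : Prop := ∀ (msg : String), Dom_colorize_message_py msg → Spec_colorize_message_py msg (colorize_message_py msg)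

-- ===== LEMMAS AND PROOFS =====

-- Structural characterisation of Python's str.replace (PySem.Chars.replace) for a nonempty
-- pattern: leftmost, non-overlapping, restart after each hit — same recursion shape as subAlt.
def repP (old new : List Char) : List Char → List Char
  | [] => []
  | c :: t =>
    if old.isPrefixOf (c :: t) then new ++ repP old new (List.drop (old.length - 1) t)
    else c :: repP old new t
termination_by cs => cs.length
decreasing_by
  all_goals (simp [List.length_drop]; try omega)

theorem replace_go_eq (old new : List Char) (hne : old ≠ []) :
    ∀ fuel l acc, l.length ≤ fuel →
      PySem.Chars.replace.go old new fuel l acc = acc.reverse ++ repP old new l := by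
  intro fuel
  induction fuel with
  | zero =>
    intro l acc hl
    have : l = [] := by cases l <;> simp_all
    subst this
    simp [PySem.Chars.replace.go, repP]
  | succ n ih =>
    intro l acc hl
    cases l with
    | nil => simp [PySem.Chars.replace.go, repP]
    | cons c t =>
      rw [PySem.Chars.replace.go]
      by_cases hp : old.isPrefixOf (c :: t)
      · simp only [hp, if_true]
        have hdrop : List.drop old.length (c :: t) = List.drop (old.length - 1) t := by
          cases old with
          | nil => exact absurd rfl hne
          | cons o os => simp
        rw [hdrop, ih _ _ (by simp at hl; simp [List.length_drop]; omega)]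
        rw [repP]
        simp [hp]
      · simp only [hp, if_false, Bool.false_eq_true]
        rw [ih _ _ (by simp at hl ⊢; omega)]
        rw [repP]
        simp [hp]

theorem replace_eq_repP (s old new : List Char) (hne : old ≠ []) :
    PySem.Chars.replace s old new = repP old new s := by
  rw [PySem.Chars.replace]
  simp [List.isEmpty_iff, hne]
  rw [replace_go_eq old new hne s.length s [] le_rfl]
  simp

theorem repP_of_not_infix (old new s : List Char) (h : ¬ old <:+: s) :
    repP old new s = s := by
  induction s with
  | nil => rw [repP]
  | cons c t ih =>
    rw [repP]
    have hp : ¬ old.isPrefixOf (c :: t) := by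
      intro hb
      exact h (List.isPrefixOf_iff_prefix.mp hb).isInfix
    simp only [hp, if_false, Bool.false_eq_true]
    rw [ih (fun hi => h (hi.trans (List.suffix_cons c t).isInfix))]

-- side conditions of the pass/step lemmas (all decidable; checked by `decide` on the
-- concrete keywords and replacement strings)
abbrev PassCond (k b : List Char) : Prop :=
  ∀ p, p < b.length → ¬ (List.drop p b <+: k) ∧ ¬ (k <+: List.drop p b)
abbrev NoStartChar (ch : Char) : Prop := ch ≠ '\x1b' ∧ ch ≠ '('
abbrev HeadBad (l : List Char) : Prop :=
  l.head? = some ('\x1b') ∨ l.head? = some '('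

theorem prefix_append_cases {α} {k b v : List α} (h : k <+: b ++ v) : k <+: b ∨ b <+: k :=
  List.prefix_or_prefix_of_prefix h (List.prefix_append b v)

theorem ball_of_all {l : List Char} {P : Char → Prop} [DecidablePred P]
    (h : l.all (fun ch => decide (P ch)) = true) : ∀ ch ∈ l, P ch :=
  fun ch hm => of_decide_eq_true (List.all_eq_true.mp h ch hm)

theorem repP_block (old new b v : List Char) (h : PassCond old b) :
    repP old new (b ++ v) = b ++ repP old new v := by
  induction b with
  | nil => simp
  | cons c b' ih =>
    have h0 := h 0 (by simp)
    rw [List.cons_append, repP]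
    have hp : ¬ old.isPrefixOf (c :: (b' ++ v)) := by
      intro hb
      rcases prefix_append_cases (b := c :: b') (List.isPrefixOf_iff_prefix.mp hb) with hc | hc
      · exact h0.2 (by simpa using hc)
      · exact h0.1 (by simpa using hc)
    simp only [hp, if_false, Bool.false_eq_true]
    rw [ih (fun p hp' => h (p + 1) (by simpa using Nat.succ_lt_succ hp'))]
    simp

theorem repP_match (c : Char) (o' new v : List Char) :
    repP (c :: o') new ((c :: o') ++ v) = new ++ repP (c :: o') new v := by
  rw [List.cons_append, repP]
  have hp : (c :: o').isPrefixOf (c :: (o' ++ v)) := by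
    simp [List.isPrefixOf_iff_prefix]
  simp only [hp, if_true]
  simp

theorem subAlt_nil (cs : List Char) : subAlt [] cs = cs := by
  induction cs with
  | nil => rw [subAlt]
  | cons c t ih => rw [subAlt]; simp [ih]

theorem subAlt_block (table : List (List Char × List Char)) (b v : List Char)
    (h : ∀ kr ∈ table, PassCond kr.1 b) :
    subAlt table (b ++ v) = b ++ subAlt table v := by
  induction b with
  | nil => simp
  | cons c b' ih =>
    rw [List.cons_append, subAlt]
    have hfind : List.find? (fun kr => kr.1.isPrefixOf (c :: (b' ++ v))) table = none := by
      rw [List.find?_eq_none]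
      intro kr hm hb
      have h0 := h kr hm 0 (by simp)
      rcases prefix_append_cases (b := c :: b') (List.isPrefixOf_iff_prefix.mp hb) with hc | hc
      · exact h0.2 (by simpa using hc)
      · exact h0.1 (by simpa using hc)
    rw [hfind]
    rw [ih (fun kr hm p hp' => h kr hm (p + 1) (by simpa using Nat.succ_lt_succ hp'))]
    simp

theorem subAlt_prefix_back (table : List (List Char × List Char))
    (hh : ∀ kr ∈ table, HeadBad kr.2) :
    ∀ n t f, t.length ≤ n → (∀ ch ∈ f, NoStartChar ch) →
      f <+: subAlt table t → f <+: t := by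
  intro n
  induction n with
  | zero =>
    intro t f ht hf hp
    have : t = [] := by cases t <;> simp_all
    subst this
    rw [subAlt] at hp
    exact hp
  | succ n ih =>
    intro t f ht hf hp
    cases t with
    | nil => rw [subAlt] at hp; exact hp
    | cons c t' =>
      rw [subAlt] at hp
      cases f with
      | nil => exact List.nil_prefix
      | cons fc f' =>
        rcases hfind : List.find? (fun kr => kr.1.isPrefixOf (c :: t')) table with _ | kr
        · rw [hfind] at hp
          rcases List.cons_prefix_cons.mp hp with ⟨hfc, hp'⟩
          subst hfc
          exact List.cons_prefix_cons.mpr ⟨rfl, ih t' f' (by simpa using ht)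
            (fun ch hm => hf ch (List.mem_cons_of_mem _ hm)) hp'⟩
        · rw [hfind] at hp
          dsimp only at hp
          have hmem := List.mem_of_find?_eq_some hfind
          have hhb := hh kr hmem
          have hnostart := hf fc List.mem_cons_self
          cases hr2 : kr.2 with
          | nil => simp [HeadBad, hr2] at hhb
          | cons h2 t2 =>
            rw [hr2, List.cons_append] at hp
            rcases List.cons_prefix_cons.mp hp with ⟨hfc, _⟩
            subst hfc
            rcases hhb with hb | hb <;> rw [hr2] at hb <;> simp at hb <;>
              simp [NoStartChar, hb] at hnostart

-- the crux: appending one more replace pass to the chain = the scan with one more alternative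
theorem step_eq (K : List (List Char × List Char)) (k r : List Char) (hk : k ≠ [])
    (c1 : ∀ kr ∈ K, PassCond k kr.2)
    (c2 : ∀ kr ∈ K, PassCond kr.1 k)
    (c3 : ∀ kr ∈ K, HeadBad kr.2)
    (c4 : ∀ ch ∈ List.drop 1 k, NoStartChar ch) :
    ∀ n cs, cs.length ≤ n →
      repP k r (subAlt K cs) = subAlt (K ++ [(k, r)]) cs := by
  intro n
  induction n with
  | zero =>
    intro cs hcs
    have : cs = [] := by cases cs <;> simp_all
    subst this
    rw [subAlt, subAlt, repP]
  | succ n ih =>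
    intro cs hcs
    cases cs with
    | nil => rw [subAlt, subAlt, repP]
    | cons c t =>
      rcases hfind : List.find? (fun kr => kr.1.isPrefixOf (c :: t)) K with _ | kr
      · -- no keyword of K matches at the head
        by_cases hp : k <+: (c :: t)
        · -- the new keyword matches: both sides wrap it
          obtain ⟨v, hv⟩ := hp
          cases k with
          | nil => exact absurd rfl hk
          | cons kc ko =>
            have hkc : kc = c := by
              have := hv; rw [List.cons_append] at this
              exact (List.cons.injEq .. ▸ this : _ ∧ _).1
            have ht : ko ++ v = t := by
              have := hv; rw [List.cons_append] at this
              exact (List.cons.injEq .. ▸ this : _ ∧ _).2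
            have hfind' : List.find? (fun kr => kr.1.isPrefixOf (c :: t)) (K ++ [(kc :: ko, r)])
                = some (kc :: ko, r) := by
              have hb : (kc :: ko).isPrefixOf (c :: t) = true := by
                rw [List.isPrefixOf_iff_prefix]; exact ⟨v, hv⟩
              rw [List.find?_append, hfind]
              simp only [List.find?_cons, hb, Option.none_or]
            conv_rhs => rw [subAlt, hfind']
            dsimp only
            have hdrop : List.drop ((kc :: ko).length - 1) t = v := by
              rw [← ht]; simp
            rw [hdrop, ← hv, subAlt_block K (kc :: ko) v (fun kr hm => c2 kr hm), repP_match]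
            rw [ih v (by
              have hlen : (kc :: ko).length + v.length = (c :: t).length := by
                rw [← hv]; simp; omega
              simp at hlen hcs ⊢; omega)]
        · -- nothing matches at the head: both sides copy the char
          have hnk : ¬ k.isPrefixOf (c :: subAlt K t) := by
            intro hb
            cases k with
            | nil => exact absurd rfl hk
            | cons kc ko =>
              rcases List.cons_prefix_cons.mp (List.isPrefixOf_iff_prefix.mp hb) with ⟨hkc, hko⟩
              subst hkc
              exact hp (List.cons_prefix_cons.mpr ⟨rfl,
                subAlt_prefix_back K c3 t.length t ko le_rfl
                  (fun ch hm => c4 ch (by simpa using hm)) hko⟩)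
          have hfind' : List.find? (fun kr => kr.1.isPrefixOf (c :: t)) (K ++ [(k, r)]) = none := by
            rw [List.find?_append, hfind]
            simp [List.isPrefixOf_iff_prefix, hp]
          conv_rhs => rw [subAlt, hfind']
          rw [subAlt, hfind]
          dsimp only
          rw [repP]
          simp only [hnk, if_false, Bool.false_eq_true]
          rw [ih t (by simp at hcs; omega)]
      · -- a keyword of K matches first: identical block on both sides
        have hmem := List.mem_of_find?_eq_some hfind
        have hfind' : List.find? (fun kr => kr.1.isPrefixOf (c :: t)) (K ++ [(k, r)]) = some kr := by
          rw [List.find?_append, hfind]; rfl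
        conv_rhs => rw [subAlt, hfind']
        rw [subAlt, hfind]
        dsimp only
        rw [repP_block k r kr.2 _ (c1 kr hmem)]
        rw [ih _ (by simp [List.length_drop] at hcs ⊢; omega)]

-- the six replace passes, chained, equal the six-alternative scan
set_option maxRecDepth 16384 in
theorem chain_eq (cs : List Char) :
    repP "Model:".toList (COLORS_BOLD ++ COLORS_WHITE ++ "Model:" ++ COLORS_RESET).toList
      (repP "LR:".toList (COLORS_BOLD ++ COLORS_BLUE ++ "LR:" ++ COLORS_RESET).toList
        (repP "KL:".toList (COLORS_GREEN ++ "KL:" ++ COLORS_RESET).toList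
          (repP "(Recon:".toList ("(" ++ COLORS_CYAN ++ "(Recon:" ++ COLORS_RESET).toList
            (repP "Loss:".toList (COLORS_BOLD ++ COLORS_MAGENTA ++ "Loss:" ++ COLORS_RESET).toList
              (repP "Epoch".toList (COLORS_YELLOW ++ "Epoch" ++ COLORS_RESET).toList cs)))))
      = subAlt altTable cs := by
  conv_lhs => rw [show cs = subAlt [] cs from (subAlt_nil cs).symm]
  have h1 := step_eq [] ("Epoch".toList) ((COLORS_YELLOW ++ "Epoch" ++ COLORS_RESET).toList)
    (by decide) (by simp) (by simp) (by simp) (ball_of_all (by decide)) cs.length cs le_rfl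
  rw [h1]
  rw [show ([] : List (List Char × List Char)) ++ [("Epoch".toList, (COLORS_YELLOW ++ "Epoch" ++ COLORS_RESET).toList)] = altTable.take 1 from by decide]
  have h2 := step_eq (altTable.take 1) ("Loss:".toList) ((COLORS_BOLD ++ COLORS_MAGENTA ++ "Loss:" ++ COLORS_RESET).toList)
    (by decide) (by decide) (by decide) (by decide) (ball_of_all (by decide)) cs.length cs le_rfl
  rw [h2]
  rw [show altTable.take 1 ++ [("Loss:".toList, (COLORS_BOLD ++ COLORS_MAGENTA ++ "Loss:" ++ COLORS_RESET).toList)] = altTable.take 2 from by decide]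
  have h3 := step_eq (altTable.take 2) ("(Recon:".toList) (("(" ++ COLORS_CYAN ++ "(Recon:" ++ COLORS_RESET).toList)
    (by decide) (by decide) (by decide) (by decide) (ball_of_all (by decide)) cs.length cs le_rfl
  rw [h3]
  rw [show altTable.take 2 ++ [("(Recon:".toList, ("(" ++ COLORS_CYAN ++ "(Recon:" ++ COLORS_RESET).toList)] = altTable.take 3 from by decide]
  have h4 := step_eq (altTable.take 3) ("KL:".toList) ((COLORS_GREEN ++ "KL:" ++ COLORS_RESET).toList)
    (by decide) (by decide) (by decide) (by decide) (ball_of_all (by decide)) cs.length cs le_rfl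
  rw [h4]
  rw [show altTable.take 3 ++ [("KL:".toList, (COLORS_GREEN ++ "KL:" ++ COLORS_RESET).toList)] = altTable.take 4 from by decide]
  have h5 := step_eq (altTable.take 4) ("LR:".toList) ((COLORS_BOLD ++ COLORS_BLUE ++ "LR:" ++ COLORS_RESET).toList)
    (by decide) (by decide) (by decide) (by decide) (ball_of_all (by decide)) cs.length cs le_rfl
  rw [h5]
  rw [show altTable.take 4 ++ [("LR:".toList, (COLORS_BOLD ++ COLORS_BLUE ++ "LR:" ++ COLORS_RESET).toList)] = altTable.take 5 from by decide]
  have h6 := step_eq (altTable.take 5) ("Model:".toList) ((COLORS_BOLD ++ COLORS_WHITE ++ "Model:" ++ COLORS_RESET).toList)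
    (by decide) (by decide) (by decide) (by decide) (ball_of_all (by decide)) cs.length cs le_rfl
  rw [h6]
  rw [show altTable.take 5 ++ [("Model:".toList, (COLORS_BOLD ++ COLORS_WHITE ++ "Model:" ++ COLORS_RESET).toList)] = altTable from by decide]

-- one pass of A's loop body (with its `in` guard) is exactly repP
theorem stepA_eq (m k r : String) (hk : k.toList ≠ []) :
    (if PySem.Str.isIn k m then PySem.Str.replace m k r else m)
      = String.ofList (repP k.toList r.toList m.toList) := by
  by_cases h : PySem.Str.isIn k m = true
  · rw [if_pos h, PySem.Str.replace, replace_eq_repP _ _ _ hk]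
  · rw [if_neg (by simpa using h)]
    have hni : ¬ k.toList <:+: m.toList := by
      intro hi
      exact h ((PySem.Str.isIn_iff_infix _ _).mpr hi)
    rw [repP_of_not_infix _ _ _ hni, String.ofList_toList]

-- ===== VERDICT (by name: the statement is the Claim_ definition above) =====
theorem colorize_message_py_spec : Claim_equal_colorize_message_py := by
  intro msg _
  unfold Spec_colorize_message_py colorize_message_py colorize_message_py_alt
  rw [show colorMappings.items
      = [("Epoch", COLORS_YELLOW),
         ("Loss:", COLORS_BOLD ++ COLORS_MAGENTA),
         ("(Recon:", "(" ++ COLORS_CYAN),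
         ("KL:", COLORS_GREEN),
         ("LR:", COLORS_BOLD ++ COLORS_BLUE),
         ("Model:", COLORS_BOLD ++ COLORS_WHITE)] from by decide]
  simp only [List.foldl]
  rw [stepA_eq _ _ _ (by decide), stepA_eq _ _ _ (by decide), stepA_eq _ _ _ (by decide),
      stepA_eq _ _ _ (by decide), stepA_eq _ _ _ (by decide), stepA_eq _ _ _ (by decide)]
  simp only [String.toList_ofList]
  exact congrArg String.ofList (chain_eq msg.toList)
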